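-- pv_equiv track=rewrite | github.com/natemago/adventofcode-2021 | day24-arithmetic-logic-unit/solution.py | rev_procedure_0
-- ===== SOURCE A (Python) =====
-- def rev_procedure_0(target):
--     # return z * 26 + w + 14
--     '''
--     z * 26 + w + 14 = t
--     z * 26 = t - 14 - w
--
--         t - w - 14
--     z = -----------
--             26
--     '''
--     results = {}
--
--     for w in range(1, 10):
--         p = target - w - 14
--         if p < 0:
--             continue
--         if p % 26:
--             continue
--         results[w] = results.get(w) or []
--         results[w].append(p//26)
--
--     return results
-- ===== SOURCE B (Python) =====
-- def rev_procedure_0(target):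
--     # Closed form: w must satisfy w = (target - 14) mod 26 with 1 <= w <= 9,
--     # and p = target - w - 14 must be >= 0; at most one solution.
--     r = (target - 14) % 26
--     if 1 <= r <= 9 and target - 14 - r >= 0:
--         return {r: [(target - 14 - r) // 26]}
--     return {}
-- ===== Notes on version B (the rewrite author's own statement) =====
-- stated objective: simpler
-- what changed: Replaces the 9-iteration loop over w with a direct modular computation: w = (target-14) % 26 is the only candidate, checked against 1..9 and p >= 0.
import Mathlib
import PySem

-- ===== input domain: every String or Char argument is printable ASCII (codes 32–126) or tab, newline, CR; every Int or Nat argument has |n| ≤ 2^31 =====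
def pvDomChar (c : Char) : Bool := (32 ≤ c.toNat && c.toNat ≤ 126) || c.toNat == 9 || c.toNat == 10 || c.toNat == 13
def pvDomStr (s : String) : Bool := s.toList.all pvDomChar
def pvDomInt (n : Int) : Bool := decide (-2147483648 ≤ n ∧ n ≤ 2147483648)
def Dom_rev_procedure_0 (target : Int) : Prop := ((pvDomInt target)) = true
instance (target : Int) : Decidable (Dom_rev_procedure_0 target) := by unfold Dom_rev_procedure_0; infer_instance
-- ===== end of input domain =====

-- B replaces A's 9-iteration scan over w by the single modular candidate w = (target-14) % 26 (simpler; same values).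

-- ===== PORT A =====
-- loop body of 'for w in range(1, 10)'; 'results.get(w) or []' keeps a non-empty list, else []
def revStepA (target : Int) (results : PySem.Dict Int (List Int)) (w : Int) : PySem.Dict Int (List Int) :=
  let p := target - w - 14
  if p < 0 then results
  else if PySem.Int.mod p 26 ≠ 0 then results
  else
    let cur : List Int :=
      match PySem.Dict.get? results w with
      | none => []
      | some l => if l.isEmpty then [] else l
    PySem.Dict.insert results w (cur ++ [PySem.Int.floordiv p 26])

def rev_procedure_0 (target : Int) : List (Int × List Int) :=
  ((PySem.List.pyRange 1 10 1).foldl (revStepA target) PySem.Dict.empty).items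

-- ===== PORT B =====
def rev_procedure_0_alt (target : Int) : List (Int × List Int) :=
  let r := PySem.Int.mod (target - 14) 26
  if 1 ≤ r ∧ r ≤ 9 ∧ 0 ≤ target - 14 - r then
    [(r, [PySem.Int.floordiv (target - 14 - r) 26])]
  else
    []

-- ===== PRECONDITION & SPEC =====
def Spec_rev_procedure_0 (target : Int) (out : List (Int × List Int)) : Prop := out = rev_procedure_0_alt target
instance (target : Int) (out : List (Int × List Int)) : Decidable (Spec_rev_procedure_0 target out) := by unfold Spec_rev_procedure_0; infer_instance

-- ===== CLAIM (what is proved, stated in full; the proofs are below) =====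
def Claim_equal_rev_procedure_0 : Prop := ∀ (target : Int), Dom_rev_procedure_0 target → Spec_rev_procedure_0 target (rev_procedure_0 target)

-- ===== LEMMAS AND PROOFS =====

-- a step whose w fails one of the two guards leaves the dict unchanged
theorem revStepA_skip (target : Int) (d : PySem.Dict Int (List Int)) (w : Int)
    (h : target - w - 14 < 0 ∨ (target - w - 14) % 26 ≠ 0) :
    revStepA target d w = d := by
  unfold revStepA
  rcases h with h | h
  · simp [h]
  · by_cases hp : target - w - 14 < 0
    · simp [hp]
    · rw [if_neg hp, if_pos]
      rwa [PySem.Int.mod_eq_emod_of_pos (by norm_num)]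

theorem foldl_revStepA_skip (target : Int) (d : PySem.Dict Int (List Int)) (L : List Int)
    (h : ∀ w ∈ L, target - w - 14 < 0 ∨ (target - w - 14) % 26 ≠ 0) :
    L.foldl (revStepA target) d = d := by
  induction L with
  | nil => rfl
  | cons x xs ih =>
    simp only [List.foldl_cons]
    rw [revStepA_skip target d x (h x (by simp)), ih]
    intro w hw; exact h w (by simp [hw])

theorem rev_procedure_0_spec : Claim_equal_rev_procedure_0 := by
  intro target _
  unfold Spec_rev_procedure_0 rev_procedure_0 rev_procedure_0_alt
  rw [PySem.Int.mod_eq_emod_of_pos (by norm_num : (0:Int) < 26)]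
  set r := (target - 14) % 26 with hr
  have hr0 : 0 ≤ r := Int.emod_nonneg _ (by norm_num)
  have hr26 : r < 26 := Int.emod_lt_of_pos _ (by norm_num)
  by_cases hmain : 1 ≤ r ∧ r ≤ 9 ∧ 0 ≤ target - 14 - r
  · rw [if_pos hmain]
    obtain ⟨h1, h9, hp⟩ := hmain
    have hskip1 : (PySem.List.pyRange 1 r 1).foldl (revStepA target) PySem.Dict.empty
        = PySem.Dict.empty := by
      apply foldl_revStepA_skip
      intro w hw
      rw [PySem.List.mem_pyRange_one] at hw
      right; omega
    have hstep : revStepA target PySem.Dict.empty r =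
        PySem.Dict.insert PySem.Dict.empty r [PySem.Int.floordiv (target - r - 14) 26] := by
      unfold revStepA
      rw [if_neg (by omega), if_neg (by
        rw [PySem.Int.mod_eq_emod_of_pos (by norm_num)]
        simp only [ne_eq, not_not]
        omega)]
      simp [PySem.Dict.get?_empty]
    rw [PySem.List.pyRange_one_append 1 r 10 (by omega) (by omega),
        PySem.List.pyRange_one_cons (show r < 10 by omega),
        List.foldl_append, hskip1, List.foldl_cons, hstep,
        foldl_revStepA_skip target _ _ (by
          intro w hw
          rw [PySem.List.mem_pyRange_one] at hw
          right; omega)]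
    rw [PySem.Dict.items_insert_of_not_contains _ _ (by simp)]
    have : target - r - 14 = target - 14 - r := by ring
    simp [PySem.Dict.empty, this]
  · rw [if_neg hmain]
    rw [foldl_revStepA_skip target _ _ (by
      intro w hw
      rw [PySem.List.mem_pyRange_one] at hw
      by_cases hw9 : w = r
      · left; omega
      · right; omega)]
    rfl
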